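-- pv_equiv track=rewrite | github.com/Viknesh-Rajaramon/Leetcode-Problems | Algorithms/Medium/3649_Number_of_Perfect_Pairs.py | perfectPairs
-- ===== SOURCE A (Python) =====
-- from typing import List
--
-- def perfectPairs(nums: List[int]) -> int:
--     arr = sorted([abs(num) for num in nums])
--     result = 0
--     n, l = len(arr), 0
--     for r in range(n):
--         while arr[r] > arr[l]*2:
--             l += 1
--
--         result += r-l
--
--     return result
-- ===== SOURCE B (Python) =====
-- def perfectPairs(nums):
--     arr = sorted(abs(x) for x in nums)
--     total = 0
--     for r in range(len(arr)):
--         t = (arr[r] + 1) // 2  # arr[i] >= t  <=>  2*arr[i] >= arr[r]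
--         lo, hi = 0, r          # bisect_left(arr, t, 0, r) by hand
--         while lo < hi:
--             mid = (lo + hi) // 2
--             if arr[mid] < t:
--                 lo = mid + 1
--             else:
--                 hi = mid
--         total += r - lo
--     return total
-- ===== Notes on version B (the rewrite author's own statement) =====
-- stated objective: alternative
-- what changed: Replaces A's monotone two-pointer window over the sorted absolute values with an independent hand-written binary search (bisect_left) per element for the first index whose doubled value reaches arr[r], using the exact ceil threshold t = (arr[r]+1)//2.
import Mathlib
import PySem

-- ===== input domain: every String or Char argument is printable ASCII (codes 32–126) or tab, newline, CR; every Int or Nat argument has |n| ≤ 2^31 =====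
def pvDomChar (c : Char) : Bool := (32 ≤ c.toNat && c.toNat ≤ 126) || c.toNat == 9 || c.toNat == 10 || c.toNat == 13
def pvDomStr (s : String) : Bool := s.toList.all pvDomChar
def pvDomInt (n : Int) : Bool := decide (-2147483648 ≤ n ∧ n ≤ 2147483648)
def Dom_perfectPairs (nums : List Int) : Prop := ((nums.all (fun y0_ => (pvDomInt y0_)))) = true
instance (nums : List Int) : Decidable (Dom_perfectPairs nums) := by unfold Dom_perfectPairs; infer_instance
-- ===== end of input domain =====

-- B replaces A's monotone two-pointer window over the sorted |nums| with an
-- independent hand-written binary search per element (objective: alternative).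

-- ===== PORT A =====
-- the 'while arr[r] > arr[l]*2: l += 1' loop, fuel-bounded (fuel = len(arr) always suffices)
def pvAdvA (arr : List Int) (vr : Int) : Nat → Int → Int
  | 0, l => l
  | fuel+1, l =>
    if vr > (PySem.List.pyGetD arr l 0) * 2 then pvAdvA arr vr fuel (l + 1) else l

def perfectPairs (nums : List Int) : Int :=
  let arr := PySem.List.sorted (nums.map (fun num => |num|)) (fun x => x) false
  let n : Int := arr.length
  let st := (PySem.List.pyRange 0 n 1).foldl
    (fun (st : Int × Int) r =>
      let l := pvAdvA arr (PySem.List.pyGetD arr r 0) arr.length st.2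
      (st.1 + (r - l), l)) (0, 0)
  st.1

-- ===== PORT B =====
-- the 'while lo < hi: …' binary search, fuel-bounded (fuel = len(arr) always suffices)
def pvBisB (arr : List Int) (t : Int) : Nat → Int → Int → Int
  | 0, lo, _ => lo
  | fuel+1, lo, hi =>
    if lo < hi then
      let mid := PySem.Int.floordiv (lo + hi) 2
      if PySem.List.pyGetD arr mid 0 < t then pvBisB arr t fuel (mid + 1) hi
      else pvBisB arr t fuel lo mid
    else lo

def perfectPairs_alt (nums : List Int) : Int :=
  let arr := PySem.List.sorted (nums.map (fun x => |x|)) (fun x => x) false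
  (PySem.List.pyRange 0 (arr.length : Int) 1).foldl
    (fun total r =>
      let t := PySem.Int.floordiv (PySem.List.pyGetD arr r 0 + 1) 2
      total + (r - pvBisB arr t arr.length 0 r)) 0

-- ===== PRECONDITION & SPEC =====
def Spec_perfectPairs (nums : List Int) (out : Int) : Prop := out = perfectPairs_alt nums
instance (nums : List Int) (out : Int) : Decidable (Spec_perfectPairs nums out) := by unfold Spec_perfectPairs; infer_instance

-- ===== CLAIM (what is proved, stated in full; the proofs are below) =====
def Claim_equal_perfectPairs : Prop := ∀ (nums : List Int), Dom_perfectPairs nums → Spec_perfectPairs nums (perfectPairs nums)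

-- ===== LEMMAS AND PROOFS =====

-- ceil conversion: arr[i] ≥ (v+1)//2  ↔  2*arr[i] ≥ v
theorem pv_ceil_iff (v b : Int) : PySem.Int.floordiv (v + 1) 2 ≤ b ↔ v ≤ 2 * b := by
  rw [PySem.Int.floordiv_eq_ediv_of_pos (by omega)]
  omega

-- A's while loop lands on the least index m with v ≤ 2*g m
theorem pvAdvA_eq (arr : List Int) (v : Int) (fuel l m : Nat)
    (hlm : l ≤ m) (hlt : ∀ i < m, 2 * arr.getD i 0 < v) (hge : v ≤ 2 * arr.getD m 0)
    (hfuel : m ≤ l + fuel) :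
    pvAdvA arr v fuel (l : Int) = (m : Int) := by
  induction fuel generalizing l with
  | zero =>
    have : l = m := by omega
    simp [pvAdvA, this]
  | succ fuel ih =>
    rw [pvAdvA]
    simp only [PySem.List.pyGetD_natCast]
    by_cases h : v > arr.getD l 0 * 2
    · have hlm' : l < m := by
        by_contra hc
        have hEq : l = m := by omega
        subst hEq
        omega
      rw [if_pos h]
      have : ((l : Int) + 1) = ((l + 1 : Nat) : Int) := by push_cast; ring
      rw [this]
      exact ih (l + 1) (by omega) (by omega)
    · rw [if_neg h]
      have : m ≤ l := by
        by_contra hc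
        have := hlt l (by omega)
        omega
      have : l = m := by omega
      rw [this]

-- B's binary search lands on the unique m with g < t before it and t ≤ g on [m, r)
theorem pvBisB_eq (arr : List Int) (t : Int) (r : Nat) (fuel lo hi m : Nat)
    (hlo : lo ≤ m) (hhi : m ≤ hi) (hhr : hi ≤ r)
    (hbelow : ∀ i < m, arr.getD i 0 < t) (habove : ∀ i, m ≤ i → i < r → t ≤ arr.getD i 0)
    (hfuel : hi - lo ≤ fuel) :
    pvBisB arr t fuel (lo : Int) (hi : Int) = (m : Int) := by
  induction fuel generalizing lo hi with
  | zero =>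
    have : lo = m := by omega
    simp [pvBisB, this]
  | succ fuel ih =>
    rw [pvBisB]
    by_cases h : (lo : Int) < (hi : Int)
    · rw [if_pos h]
      have hlh : lo < hi := by exact_mod_cast h
      have hmid : PySem.Int.floordiv ((lo : Int) + (hi : Int)) 2 = (((lo + hi) / 2 : Nat) : Int) := by
        have := PySem.Int.floordiv_natCast (lo + hi) 2
        push_cast at this ⊢
        exact this
      set midN := (lo + hi) / 2 with hmidN
      have hb1 : lo ≤ midN := by omega
      have hb2 : midN < hi := by omega
      simp only [hmid, PySem.List.pyGetD_natCast]
      by_cases hc : arr.getD midN 0 < t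
      · rw [if_pos hc]
        have hmm : midN < m := by
          by_contra hcc
          have := habove midN (by omega) (by omega)
          omega
        have : ((midN : Int) + 1) = ((midN + 1 : Nat) : Int) := by push_cast; ring
        rw [this]
        exact ih (midN + 1) hi (by omega) hhi hhr (by omega)
      · rw [if_neg hc]
        have hmm : m ≤ midN := by
          by_contra hcc
          have := hbelow midN (by omega)
          omega
        exact ih lo midN hlo hmm (by omega) (by omega)
    · rw [if_neg h]
      have : lo = m := by omega
      rw [this]

-- the two folds agree step by step, threading A's pointer l as the invariant
theorem pv_fold_eq (arr : List Int)
    (hsort : ∀ i j, i ≤ j → j < arr.length → arr.getD i 0 ≤ arr.getD j 0)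
    (hpos : ∀ i, i < arr.length → 0 ≤ arr.getD i 0)
    (k : Nat) (hk : k ≤ arr.length) :
    ∃ l : Nat,
      ((PySem.List.pyRange 0 (k : Int) 1).foldl
        (fun (st : Int × Int) r =>
          let l := pvAdvA arr (PySem.List.pyGetD arr r 0) arr.length st.2
          (st.1 + (r - l), l)) (0, 0)) =
      (((PySem.List.pyRange 0 (k : Int) 1).foldl
        (fun total r =>
          let t := PySem.Int.floordiv (PySem.List.pyGetD arr r 0 + 1) 2
          total + (r - pvBisB arr t arr.length 0 r)) 0), (l : Int)) ∧
      l ≤ k ∧ (k < arr.length → ∀ i < l, 2 * arr.getD i 0 < arr.getD k 0) := by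
  induction k with
  | zero =>
    refine ⟨0, ?_, le_refl 0, fun _ i hi => absurd hi (by omega)⟩
    simp [PySem.List.pyRange_one_eq_nil]
  | succ k ih =>
    obtain ⟨l, hfold, hlk, hinv⟩ := ih (by omega)
    have hkn : k < arr.length := by omega
    -- the canonical split index for r = k
    have hex : ∃ i, arr.getD k 0 ≤ 2 * arr.getD i 0 ∧ i ≤ k := by
      exact ⟨k, by have := hpos k hkn; omega, le_refl k⟩
    classical
    set Q := fun i => arr.getD k 0 ≤ 2 * arr.getD i 0 ∧ i ≤ k with hQ
    have hexQ : ∃ i, Q i := hex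
    set m := Nat.find hexQ with hm
    have hQm : Q m := Nat.find_spec hexQ
    have hmk : m ≤ k := hQm.2
    have hminQ : ∀ i < m, ¬ Q i := fun i hi => Nat.find_min hexQ hi
    have hlt : ∀ i < m, 2 * arr.getD i 0 < arr.getD k 0 := by
      intro i hi
      by_contra hc
      exact hminQ i hi ⟨by omega, by omega⟩
    have hge : arr.getD k 0 ≤ 2 * arr.getD m 0 := hQm.1
    -- step both folds
    have hsplit : PySem.List.pyRange 0 ((k + 1 : Nat) : Int) 1
        = PySem.List.pyRange 0 (k : Int) 1 ++ [(k : Int)] := by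
      push_cast
      exact PySem.List.pyRange_one_succ_right (by omega)
    refine ⟨m, ?_, by omega, ?_⟩
    · rw [hsplit, List.foldl_append, List.foldl_append, hfold]
      simp only [List.foldl_cons, List.foldl_nil, PySem.List.pyGetD_natCast]
      have hlmle : l ≤ m := by
        by_contra hc
        have := hinv hkn m (by omega)
        omega
      have hA : pvAdvA arr (arr.getD k 0) arr.length (l : Int) = (m : Int) :=
        pvAdvA_eq arr (arr.getD k 0) arr.length l m hlmle hlt hge (by omega)
      have hB : pvBisB arr (PySem.Int.floordiv (arr.getD k 0 + 1) 2) arr.length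
          ((0 : Nat) : Int) ((k : Nat) : Int) = (m : Int) := by
        apply pvBisB_eq arr _ k arr.length 0 k m (by omega) hmk (le_refl k)
        · intro i hi
          have h1 := hlt i hi
          have := (pv_ceil_iff (arr.getD k 0) (arr.getD i 0)).not
          omega
        · intro i hmi hik
          rw [pv_ceil_iff]
          have := hsort m i hmi (by omega)
          omega
        · omega
      rw [hA]
      norm_num at hB ⊢
      rw [hB]
    · intro hk1 i hi
      have h1 := hlt i hi
      have h2 := hsort k (k + 1) (by omega) hk1
      omega

-- ===== VERDICT (by name: the statement is the Claim_ definition above) =====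
theorem perfectPairs_spec : Claim_equal_perfectPairs := by
  intro nums _
  unfold Spec_perfectPairs perfectPairs perfectPairs_alt
  set arr := PySem.List.sorted (nums.map (fun num => |num|)) (fun x => x) false with harr
  have hsortP : arr.Pairwise (fun a b => a ≤ b) := PySem.List.sorted_pairwise _ _
  have hsort : ∀ i j, i ≤ j → j < arr.length → arr.getD i 0 ≤ arr.getD j 0 := by
    intro i j hij hj
    rcases Nat.eq_or_lt_of_le hij with h | h
    · rw [h]
    · have hi : i < arr.length := by omega
      have := (List.pairwise_iff_getElem.mp hsortP) i j hi hj h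
      rw [List.getD_eq_getElem arr 0 hi, List.getD_eq_getElem arr 0 hj]
      exact this
  have hpos : ∀ i, i < arr.length → 0 ≤ arr.getD i 0 := by
    intro i hi
    rw [List.getD_eq_getElem arr 0 hi]
    have hmem : arr[i] ∈ arr := List.getElem_mem hi
    obtain ⟨x, _, hx⟩ := List.mem_map.mp ((PySem.List.mem_sorted _ _ _ _).mp hmem)
    rw [← hx]
    exact abs_nonneg x
  obtain ⟨l, hfold, -, -⟩ := pv_fold_eq arr hsort hpos arr.length (le_refl _)
  simp only [hfold]
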